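-- pv_equiv track=rewrite | github.com/Sydneyanon/SENTINEL_V2 | wallet_autodiscovery.py | _detect_specialty
-- ===== SOURCE A (Python) =====
-- from typing import Dict, Optional, List
--
-- def _detect_specialty(wallet_data: Dict) -> str:
--     """Detect what the wallet specializes in"""
--     # Look at their top tokens or tags
--     tags = wallet_data.get('tags', [])
--
--     if any('ai' in tag.lower() for tag in tags):
--         return 'AI'
--     elif any('desci' in tag.lower() for tag in tags):
--         return 'DeSci'
--     elif any('meme' in tag.lower() for tag in tags):
--         return 'Meme'
--     elif any('defi' in tag.lower() for tag in tags):
--         return 'DeFi'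
--     else:
--         return 'General'
-- ===== SOURCE B (Python) =====
-- _PAIRS = [('ai', 'AI'), ('desci', 'DeSci'), ('meme', 'Meme'), ('defi', 'DeFi')]
--
-- def _detect_specialty(wallet_data):
--     """Detect what the wallet specializes in (single pass with a best-priority accumulator)"""
--     tags = wallet_data.get('tags', [])
--     best = len(_PAIRS)
--     for tag in tags:
--         low = tag.lower()
--         for i in range(best):
--             if _PAIRS[i][0] in low:
--                 best = i
--                 break
--     return _PAIRS[best][1] if best < len(_PAIRS) else 'General'
-- ===== Notes on version B (the rewrite author's own statement) =====
-- stated objective: alternative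
-- what changed: Replaces four separate any-scans over the tag list (one per keyword) by a single pass that lowercases each tag once and maintains the best (smallest) matching priority index into an ordered (keyword,label) table, looking the label up at the end.
import Mathlib
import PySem

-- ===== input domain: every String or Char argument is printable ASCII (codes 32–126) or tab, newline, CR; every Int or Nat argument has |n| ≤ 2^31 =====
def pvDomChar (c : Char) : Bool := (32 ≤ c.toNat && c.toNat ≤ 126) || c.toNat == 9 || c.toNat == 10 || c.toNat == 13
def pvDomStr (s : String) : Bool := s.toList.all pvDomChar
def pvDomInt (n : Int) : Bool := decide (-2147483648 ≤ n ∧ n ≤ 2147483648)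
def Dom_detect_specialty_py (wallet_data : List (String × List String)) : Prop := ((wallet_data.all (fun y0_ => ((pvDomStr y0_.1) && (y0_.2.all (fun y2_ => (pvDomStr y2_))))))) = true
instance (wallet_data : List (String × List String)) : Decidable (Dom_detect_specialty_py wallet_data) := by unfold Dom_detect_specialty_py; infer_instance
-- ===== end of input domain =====

-- B replaces A's four separate any-scans by a single pass keeping the best matching priority index; same result, proved equal.

-- ===== PORT A =====
def detect_specialty_py (wallet_data : List (String × List String)) : String :=
  let tags := (PySem.Dict.mk wallet_data).getD "tags" []
  if tags.any (fun tag => PySem.Str.isIn "ai" (PySem.Str.lower tag)) then "AI"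
  else if tags.any (fun tag => PySem.Str.isIn "desci" (PySem.Str.lower tag)) then "DeSci"
  else if tags.any (fun tag => PySem.Str.isIn "meme" (PySem.Str.lower tag)) then "Meme"
  else if tags.any (fun tag => PySem.Str.isIn "defi" (PySem.Str.lower tag)) then "DeFi"
  else "General"

-- ===== PORT B =====
def pvPairs : List (String × String) := [("ai", "AI"), ("desci", "DeSci"), ("meme", "Meme"), ("defi", "DeFi")]

def detect_specialty_py_alt (wallet_data : List (String × List String)) : String :=
  let tags := (PySem.Dict.mk wallet_data).getD "tags" []
  let best := tags.foldl (fun best tag =>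
    let low := PySem.Str.lower tag
    ((List.range best).find? (fun i => PySem.Str.isIn (pvPairs.getD i ("", "")).1 low)).getD best)
    pvPairs.length
  if best < pvPairs.length then (pvPairs.getD best ("", "")).2 else "General"

-- ===== PRECONDITION & SPEC =====
def Spec_detect_specialty_py (wallet_data : List (String × List String)) (out : String) : Prop := out = detect_specialty_py_alt wallet_data
instance (wallet_data : List (String × List String)) (out : String) : Decidable (Spec_detect_specialty_py wallet_data out) := by unfold Spec_detect_specialty_py; infer_instance

-- ===== CLAIM (what is proved, stated in full; the proofs are below) =====
def Claim_equal_detect_specialty_py : Prop := ∀ (wallet_data : List (String × List String)), Dom_detect_specialty_py wallet_data → Spec_detect_specialty_py wallet_data (detect_specialty_py wallet_data)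

-- ===== LEMMAS AND PROOFS =====

-- keyword-i matches tag
def pvP (i : Nat) (tag : String) : Bool := PySem.Str.isIn (pvPairs.getD i ("", "")).1 (PySem.Str.lower tag)

-- first matching priority index of a single tag (4 = none)
def pvFirst (tag : String) : Nat := ((List.range 4).find? (fun i => pvP i tag)).getD 4

-- best priority over a whole tag list, phrased via A's four anys
def pvIdx (ts : List String) : Nat :=
  if ts.any (pvP 0) then 0 else if ts.any (pvP 1) then 1
  else if ts.any (pvP 2) then 2 else if ts.any (pvP 3) then 3 else 4

lemma pvStep_eq (b : Nat) (hb : b ≤ 4) (tag : String) :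
    ((List.range b).find? (fun i => pvP i tag)).getD b = min b (pvFirst tag) := by
  interval_cases b <;>
    (rcases h0 : pvP 0 tag <;> rcases h1 : pvP 1 tag <;> rcases h2 : pvP 2 tag <;>
      rcases h3 : pvP 3 tag <;>
      simp [pvFirst, show List.range 4 = [0,1,2,3] from rfl,
        show List.range 3 = [0,1,2] from rfl, show List.range 2 = [0,1] from rfl,
        show List.range 1 = [0] from rfl, List.find?, h0, h1, h2, h3])

lemma pvIdx_cons (t : String) (ts : List String) :
    pvIdx (t :: ts) = min (pvFirst t) (pvIdx ts) := by
  rcases h0 : pvP 0 t <;> rcases h1 : pvP 1 t <;> rcases h2 : pvP 2 t <;> rcases h3 : pvP 3 t <;>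
    simp [pvIdx, pvFirst, show List.range 4 = [0,1,2,3] from rfl, List.find?,
      List.any_cons, h0, h1, h2, h3] <;>
    split_ifs <;> omega

lemma pvFold_eq (ts : List String) : ∀ (b : Nat), b ≤ 4 →
    ts.foldl (fun best tag => ((List.range best).find? (fun i => pvP i tag)).getD best) b
      = min b (pvIdx ts) := by
  induction ts with
  | nil =>
    intro b hb
    simp [pvIdx]
    omega
  | cons t ts ih =>
    intro b hb
    rw [List.foldl_cons, pvStep_eq b hb t, ih _ (by omega), pvIdx_cons]
    omega

-- ===== VERDICT (by name: the statement is the Claim_ definition above) =====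
theorem detect_specialty_py_spec : Claim_equal_detect_specialty_py := by
  intro wallet_data _
  show detect_specialty_py wallet_data = detect_specialty_py_alt wallet_data
  unfold detect_specialty_py detect_specialty_py_alt
  set tags := (PySem.Dict.mk wallet_data).getD "tags" [] with htags
  clear htags
  have hA0 : (fun tag => PySem.Str.isIn "ai" (PySem.Str.lower tag)) = pvP 0 := rfl
  have hA1 : (fun tag => PySem.Str.isIn "desci" (PySem.Str.lower tag)) = pvP 1 := rfl
  have hA2 : (fun tag => PySem.Str.isIn "meme" (PySem.Str.lower tag)) = pvP 2 := rfl
  have hA3 : (fun tag => PySem.Str.isIn "defi" (PySem.Str.lower tag)) = pvP 3 := rfl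
  have hB : (fun best tag =>
      let low := PySem.Str.lower tag
      ((List.range best).find? (fun i => PySem.Str.isIn (pvPairs.getD i ("", "")).1 low)).getD best)
      = (fun best tag => ((List.range best).find? (fun i => pvP i tag)).getD best) := rfl
  simp only [hA0, hA1, hA2, hA3, hB, show pvPairs.length = 4 from rfl]
  rw [pvFold_eq tags 4 (by omega)]
  rcases h0 : tags.any (pvP 0) <;> rcases h1 : tags.any (pvP 1) <;>
    rcases h2 : tags.any (pvP 2) <;> rcases h3 : tags.any (pvP 3) <;>
    simp [pvIdx, h0, h1, h2, h3, pvPairs]
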